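-- pv_equiv track=rewrite | github.com/pydata/xarray | xarray/ufuncs.py | _remove_unused_reference_labels
-- ===== SOURCE A (Python) =====
-- def _remove_unused_reference_labels(doc):
--     if not isinstance(doc, str):
--         return doc
--
--     max_references = 5
--     for num in range(max_references):
--         label = f".. [{num}]"
--         reference = f"[{num}]_"
--         index = f"{num}.    "
--
--         if label not in doc or reference in doc:
--             continue
--
--         doc = doc.replace(label, index)
--
--     return doc
-- ===== SOURCE B (Python) =====
-- import re
--
-- _LABEL_RE = re.compile(r"\.\. \[([0-4])\]")
--
--
-- def _remove_unused_reference_labels(doc):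
--     if not isinstance(doc, str):
--         return doc
--
--     def repl(m):
--         num = m.group(1)
--         if f"[{num}]_" in doc:
--             return m.group(0)
--         return f"{num}.    "
--
--     return _LABEL_RE.sub(repl, doc)
-- ===== Notes on version B (the rewrite author's own statement) =====
-- stated objective: idiomatic
-- what changed: A makes five sequential whole-document str.replace passes (one per label 0-4, each preceded by two substring scans of the current document); B applies one precompiled regex substitution in a single left-to-right pass, deciding each matched label against the original docstring in the callback.
import Mathlib
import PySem

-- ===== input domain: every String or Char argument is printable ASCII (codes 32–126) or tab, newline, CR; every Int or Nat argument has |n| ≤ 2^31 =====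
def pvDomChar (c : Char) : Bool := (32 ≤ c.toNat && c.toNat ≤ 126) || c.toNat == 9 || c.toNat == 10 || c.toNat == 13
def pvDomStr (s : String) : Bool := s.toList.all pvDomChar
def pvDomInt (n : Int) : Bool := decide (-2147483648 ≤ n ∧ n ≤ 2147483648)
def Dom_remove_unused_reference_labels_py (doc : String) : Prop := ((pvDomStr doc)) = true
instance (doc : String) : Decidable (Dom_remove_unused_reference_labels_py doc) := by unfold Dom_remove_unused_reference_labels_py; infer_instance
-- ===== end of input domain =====

-- B replaces A's five whole-document replace passes by one left-to-right scan (a hand-ported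
-- fixed-shape regex substitution); equality of the return values is proved for all strings.

-- ===== PORT A =====
-- literal transliteration of _remove_unused_reference_labels (the isinstance guard is vacuous:
-- doc : String by the type convention); f-strings are built at the character-list level.
def remove_unused_reference_labels_py (doc : String) : String :=
  (PySem.List.pyRange 0 5 1).foldl (fun d num =>
    let label : String := String.ofList (".. [".toList ++ (PySem.Int.toStr num).toList ++ "]".toList)
    let reference : String := String.ofList ("[".toList ++ (PySem.Int.toStr num).toList ++ "]_".toList)
    let index : String := String.ofList ((PySem.Int.toStr num).toList ++ ".    ".toList)
    if !(PySem.Str.isIn label d) || PySem.Str.isIn reference d then d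
    else PySem.Str.replace d label index) doc

-- ===== PORT B =====
-- B-side helpers: the matched label ".. [d]", its replacement "d.    ", and the reference "[d]_"
def pvPat (d : Char) : List Char := ['.', '.', ' ', '[', d, ']']
def pvRep (d : Char) : List Char := [d, '.', ' ', ' ', ' ', ' ']
def pvRef (d : Char) : List Char := ['[', d, ']', '_']

-- hand port of matching the regex  \.\. \[([0-4])\]  at the current position (PySem has no re);
-- exact: the pattern is one fixed literal with one character class; returns the captured digit
def pvMatch : List Char → Option Char
  | '.' :: '.' :: ' ' :: '[' :: d :: ']' :: _ =>
      if d ∈ (['0', '1', '2', '3', '4'] : List Char) then some d else none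
  | _ => none

-- hand port of re.sub's leftmost, non-overlapping scan with Source B's callback (exact for this
-- fixed-shape pattern): on a match, emit the match itself if "[d]_" occurs in the ORIGINAL doc,
-- else "d.    ", and continue after the match; otherwise move one character forward
def pvAltGo (doc : List Char) : List Char → List Char
  | [] => []
  | c :: t =>
    match pvMatch (c :: t) with
    | some d =>
        (if PySem.Chars.isIn (pvRef d) doc then pvPat d else pvRep d) ++ pvAltGo doc (t.drop 5)
    | none => c :: pvAltGo doc t
termination_by s => s.length
decreasing_by
  all_goals simp [List.length_drop] <;> omega

def remove_unused_reference_labels_py_alt (doc : String) : String :=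
  String.ofList (pvAltGo doc.toList doc.toList)

-- ===== PRECONDITION & SPEC =====
def Spec_remove_unused_reference_labels_py (doc : String) (out : String) : Prop := out = remove_unused_reference_labels_py_alt doc
instance (doc : String) (out : String) : Decidable (Spec_remove_unused_reference_labels_py doc out) := by unfold Spec_remove_unused_reference_labels_py; infer_instance

-- ===== CLAIM (what is proved, stated in full; the proofs are below) =====
def Claim_equal_remove_unused_reference_labels_py : Prop := ∀ (doc : String), Dom_remove_unused_reference_labels_py doc → Spec_remove_unused_reference_labels_py doc (remove_unused_reference_labels_py doc)

-- ===== LEMMAS AND PROOFS =====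

def pvDigits : List Char := ['0', '1', '2', '3', '4']

-- clean (acc/fuel-free) form of PySem.Chars.replace's scan, for a nonempty pattern
def pvScan (old new : List Char) : List Char → List Char
  | [] => []
  | c :: t =>
      if old.isPrefixOf (c :: t) then new ++ pvScan old new (t.drop (old.length - 1))
      else c :: pvScan old new t
termination_by s => s.length
decreasing_by
  all_goals simp [List.length_drop] <;> omega

-- "old matches at no position inside block, even continuing into an arbitrary suffix"
def pvNoHit (old block : List Char) : Prop :=
  ∀ k, k < block.length → ∀ u : List Char, ¬ old.isPrefixOf (block.drop k ++ u)

theorem pvGo_eq_scan (old new : List Char) (hold : old ≠ []) :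
    ∀ fuel l acc, l.length ≤ fuel →
      PySem.Chars.replace.go old new fuel l acc = acc.reverse ++ pvScan old new l := by
  intro fuel
  induction fuel with
  | zero =>
      intro l acc hl
      have : l = [] := List.length_eq_zero_iff.mp (Nat.le_zero.mp hl)
      subst this; simp [PySem.Chars.replace.go, pvScan]
  | succ n ih =>
      intro l acc hl
      cases l with
      | nil => simp [PySem.Chars.replace.go, pvScan]
      | cons c t =>
          rw [PySem.Chars.replace.go]
          by_cases hp : old.isPrefixOf (c :: t)
          · have h1 : 1 ≤ old.length := by
              cases old with
              | nil => exact absurd rfl hold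
              | cons a b => simp
            have hdrop : List.drop old.length (c :: t) = t.drop (old.length - 1) := by
              cases old with
              | nil => exact absurd rfl hold
              | cons a b => simp
            rw [if_pos hp, hdrop, ih _ _ (by simp [List.length_drop] at hl ⊢; omega)]
            rw [pvScan, if_pos hp]
            simp
          · rw [if_neg hp, ih _ _ (by simp at hl ⊢; omega)]
            rw [pvScan, if_neg hp]
            simp
theorem pvReplace_eq_scan (s old new : List Char) (hold : old ≠ []) :
    PySem.Chars.replace s old new = pvScan old new s := by
  rw [PySem.Chars.replace]
  rw [if_neg (by simp [hold])]
  simpa using pvGo_eq_scan old new hold s.length s [] le_rfl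

theorem pvScan_eq_self (old new : List Char) :
    ∀ s, ¬ old <:+: s → pvScan old new s = s := by
  intro s
  induction s with
  | nil => intro _; simp [pvScan]
  | cons c t ih =>
      intro h
      rw [pvScan, if_neg (fun hp => h ((List.isPrefixOf_iff_prefix.mp hp).isInfix))]
      rw [ih (fun ht => h (ht.trans (List.suffix_cons c t).isInfix))]

theorem pvNoHit_tail {old : List Char} {c : Char} {bs : List Char}
    (h : pvNoHit old (c :: bs)) : pvNoHit old bs := by
  intro k hk u
  have := h (k + 1) (by simp; omega) u
  simpa using this

theorem pvScan_append_of_noHit (old new : List Char) (block : List Char)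
    (h : pvNoHit old block) : ∀ u, pvScan old new (block ++ u) = block ++ pvScan old new u := by
  induction block with
  | nil => intro u; simp
  | cons c bs ih =>
      intro u
      have h0 : ¬ old.isPrefixOf (c :: (bs ++ u)) := by
        have := h 0 (by simp) u; simpa using this
      rw [List.cons_append, pvScan, if_neg h0, ih (pvNoHit_tail h) u, List.cons_append]

theorem pvInfix_append_of_noHit (sub : List Char) (block : List Char)
    (h : pvNoHit sub block) : ∀ u, (sub <:+: block ++ u ↔ sub <:+: u) := by
  induction block with
  | nil => intro u; simp
  | cons c bs ih =>
      intro u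
      rw [List.cons_append, List.infix_cons_iff, ih (pvNoHit_tail h) u]
      constructor
      · rintro (hp | hi)
        · exact absurd (List.isPrefixOf_iff_prefix.mpr hp) (by simpa using h 0 (by simp) u)
        · exact hi
      · exact Or.inr

-- the pattern of another digit never matches inside a label block
theorem pvNoHit_pat_pat {d e : Char} (hd : d ∈ pvDigits) (he : e ∈ pvDigits) (hne : e ≠ d) :
    pvNoHit (pvPat e) (pvPat d) := by
  intro k hk u
  simp [pvPat] at hk
  interval_cases k <;>
    fin_cases hd <;> fin_cases he <;>
      simp_all [pvPat, List.isPrefixOf]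

-- no label pattern matches inside a replacement block
theorem pvNoHit_pat_rep {d : Char} (e : Char) (hd : d ∈ pvDigits) :
    pvNoHit (pvPat e) (pvRep d) := by
  intro k hk u
  simp [pvRep] at hk
  interval_cases k <;> fin_cases hd <;> simp [pvPat, pvRep, List.isPrefixOf]

-- the reference of a DIFFERENT digit never occurs inside a label block
theorem pvNoHit_ref_pat {d e : Char} (hd : d ∈ pvDigits) (hne : e ≠ d) :
    pvNoHit (pvRef e) (pvPat d) := by
  intro k hk u
  simp [pvPat] at hk
  interval_cases k <;> fin_cases hd <;> simp_all [pvRef, pvPat, List.isPrefixOf]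

-- no reference occurs inside a replacement block
theorem pvNoHit_ref_rep {d : Char} (e : Char) (hd : d ∈ pvDigits) :
    pvNoHit (pvRef e) (pvRep d) := by
  intro k hk u
  simp [pvRep] at hk
  interval_cases k <;> fin_cases hd <;> simp [pvRef, pvRep, List.isPrefixOf]

theorem pvScan_pat_append (d : Char) (u : List Char) :
    pvScan (pvPat d) (pvRep d) (pvPat d ++ u) = pvRep d ++ pvScan (pvPat d) (pvRep d) u := by
  rw [show pvPat d ++ u = '.' :: ('.' :: ' ' :: '[' :: d :: ']' :: u) from rfl]
  rw [pvScan, if_pos (show (pvPat d).isPrefixOf ('.' :: '.' :: ' ' :: '[' :: d :: ']' :: u) = true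
    from List.isPrefixOf_iff_prefix.mpr ⟨u, rfl⟩)]
  simp [pvPat]

-- a scan output agrees with its input on any prefix free of '.' and of the digit d
theorem pvPrefix_scan {d : Char} (w : List Char) (hw : ∀ ch ∈ w, ch ≠ '.' ∧ ch ≠ d) :
    ∀ t, (w <+: pvScan (pvPat d) (pvRep d) t ↔ w <+: t) := by
  induction w with
  | nil => intro t; simp
  | cons a w' ih =>
      intro t
      cases t with
      | nil => simp [pvScan]
      | cons x t1 =>
          by_cases hp : (pvPat d).isPrefixOf (x :: t1)
          · obtain ⟨r, hr⟩ := List.isPrefixOf_iff_prefix.mp hp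
            have hx : x = '.' := by
              have := congrArg (fun l => l.head?) hr; simpa [pvPat] using this.symm
            constructor
            · intro hpre
              rw [pvScan, if_pos hp] at hpre
              have : a = d := by
                have := congrArg (fun l => l.head?) (List.prefix_iff_eq_append.mp hpre)
                simpa [pvRep] using this
              exact absurd this (hw a (by simp)).2
            · intro hpre
              have : a = '.' := by
                have := congrArg (fun l => l.head?) (List.prefix_iff_eq_append.mp hpre)
                simpa [hx] using this
              exact absurd this (hw a (by simp)).1
          · rw [pvScan, if_neg hp]
            rw [List.cons_prefix_cons, List.cons_prefix_cons,
              ih (fun ch hch => hw ch (by simp [hch])) t1]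

-- one direction with a weaker hypothesis: w only needs to avoid the digit d
theorem pvPrefix_scan_rev {d : Char} (w : List Char) (hw : ∀ ch ∈ w, ch ≠ d) :
    ∀ t, w <+: pvScan (pvPat d) (pvRep d) t → w <+: t := by
  induction w with
  | nil => intro t _; simp
  | cons a w' ih =>
      intro t hpre
      cases t with
      | nil => simp [pvScan] at hpre
      | cons x t1 =>
          by_cases hp : (pvPat d).isPrefixOf (x :: t1)
          · rw [pvScan, if_pos hp] at hpre
            have : a = d := by
              have := congrArg (fun l => l.head?) (List.prefix_iff_eq_append.mp hpre)
              simpa [pvRep] using this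
            exact absurd this (hw a (by simp))
          · rw [pvScan, if_neg hp] at hpre
            obtain ⟨h1, h2⟩ := List.cons_prefix_cons.mp hpre
            exact List.cons_prefix_cons.mpr ⟨h1, ih (fun ch hch => hw ch (by simp [hch])) t1 h2⟩

-- occurrence of a "[e]_" reference is invariant under replacing another digit's labels
theorem pvInfix_scan_ref {d e : Char} (hd : d ∈ pvDigits) (he : e ∈ pvDigits) (hne : e ≠ d) :
    ∀ n (s : List Char), s.length ≤ n →
      (pvRef e <:+: pvScan (pvPat d) (pvRep d) s ↔ pvRef e <:+: s) := by
  intro n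
  induction n with
  | zero =>
      intro s hs
      have : s = [] := List.length_eq_zero_iff.mp (Nat.le_zero.mp hs)
      subst this; simp [pvScan]
  | succ n ih =>
      intro s hs
      cases s with
      | nil => simp [pvScan]
      | cons c t =>
          by_cases hp : (pvPat d).isPrefixOf (c :: t)
          · obtain ⟨r, hr⟩ := List.isPrefixOf_iff_prefix.mp hp
            have hshape : c :: t = pvPat d ++ r := hr.symm
            have hrlen : r.length ≤ n := by
              have := congrArg List.length hshape
              simp [pvPat] at this; simp at hs; omega
            rw [hshape, pvScan_pat_append d r,
              pvInfix_append_of_noHit _ _ (pvNoHit_ref_rep e hd),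
              ih r hrlen,
              pvInfix_append_of_noHit _ _ (pvNoHit_ref_pat hd hne)]
          · rw [pvScan, if_neg hp, List.infix_cons_iff, List.infix_cons_iff,
              ih t (by simp at hs; omega)]
            have hagree : ∀ l, (pvRef e <+: c :: l ↔ c = '[' ∧ [e, ']', '_'] <+: l) := by
              intro l
              rw [show pvRef e = '[' :: [e, ']', '_'] from rfl, List.cons_prefix_cons]
              constructor
              · rintro ⟨h1, h2⟩; exact ⟨h1.symm, h2⟩
              · rintro ⟨h1, h2⟩; exact ⟨h1.symm, h2⟩
            rw [hagree, hagree,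
              pvPrefix_scan [e, ']', '_'] (by
                intro ch hch
                fin_cases hch
                · exact ⟨by fin_cases he <;> decide, hne⟩
                · exact ⟨by decide, by fin_cases hd <;> decide⟩
                · exact ⟨by decide, by fin_cases hd <;> decide⟩) t]

theorem pvIsIn_scan_ref {d e : Char} (hd : d ∈ pvDigits) (he : e ∈ pvDigits) (hne : e ≠ d)
    (s : List Char) :
    PySem.Chars.isIn (pvRef e) (pvScan (pvPat d) (pvRep d) s) = PySem.Chars.isIn (pvRef e) s := by
  rw [Bool.eq_iff_iff, PySem.Chars.isIn_iff_infix, PySem.Chars.isIn_iff_infix]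
  exact pvInfix_scan_ref hd he hne s.length s le_rfl

-- one pass of A, conditions read off the list D (the original doc, after pvCond_inv below)
def pvGstep (D : List Char) (d : Char) (s : List Char) : List Char :=
  if PySem.Chars.isIn (pvRef d) D then s else pvScan (pvPat d) (pvRep d) s

def pvChain (D s : List Char) : List Char :=
  pvGstep D '4' (pvGstep D '3' (pvGstep D '2' (pvGstep D '1' (pvGstep D '0' s))))

-- A's per-digit step with conditions on the CURRENT string
def pvHstep (d : Char) (s : List Char) : List Char :=
  if PySem.Chars.isIn (pvRef d) s then s else pvScan (pvPat d) (pvRep d) s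

theorem pvCond_inv {d e : Char} (hd : d ∈ pvDigits) (he : e ∈ pvDigits) (hne : e ≠ d)
    (s : List Char) :
    PySem.Chars.isIn (pvRef e) (pvHstep d s) = PySem.Chars.isIn (pvRef e) s := by
  rw [pvHstep]
  split
  · rfl
  · exact pvIsIn_scan_ref hd he hne s

theorem pvGstep_skip {D : List Char} {e d : Char} (hd : d ∈ pvDigits) (he : e ∈ pvDigits)
    (hne : e ≠ d) (u : List Char) :
    pvGstep D e (pvPat d ++ u) = pvPat d ++ pvGstep D e u := by
  rw [pvGstep, pvGstep]
  split
  · rfl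
  · exact pvScan_append_of_noHit _ _ _ (pvNoHit_pat_pat hd he hne) u

theorem pvGstep_skip_rep {D : List Char} {e d : Char} (hd : d ∈ pvDigits) (u : List Char) :
    pvGstep D e (pvRep d ++ u) = pvRep d ++ pvGstep D e u := by
  rw [pvGstep, pvGstep]
  split
  · rfl
  · exact pvScan_append_of_noHit _ _ _ (pvNoHit_pat_rep e hd) u

theorem pvGstep_hit {D : List Char} (d : Char) (u : List Char) :
    pvGstep D d (pvPat d ++ u) =
      (if PySem.Chars.isIn (pvRef d) D then pvPat d else pvRep d) ++ pvGstep D d u := by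
  rw [pvGstep, pvGstep]
  split
  · rfl
  · exact pvScan_pat_append d u

theorem pvGstep_cons {D : List Char} {e : Char} {c : Char} {t : List Char}
    (h : ¬ (pvPat e).isPrefixOf (c :: t)) :
    pvGstep D e (c :: t) = c :: pvGstep D e t := by
  rw [pvGstep, pvGstep]
  split
  · rfl
  · rw [pvScan, if_neg h]

-- a gstep of another digit cannot create a label match at the current position
theorem pvNotPrefix_gstep {D : List Char} {d e c : Char} {Y : List Char}
    (hd : d ∈ pvDigits) (hne : d ≠ e)
    (h : ¬ (pvPat e).isPrefixOf (c :: Y)) :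
    ¬ (pvPat e).isPrefixOf (c :: pvGstep D d Y) := by
  intro hp
  apply h
  rw [List.isPrefixOf_iff_prefix] at hp ⊢
  rw [show pvPat e = '.' :: ['.', ' ', '[', e, ']'] from rfl] at hp ⊢
  rw [List.cons_prefix_cons] at hp ⊢
  refine ⟨hp.1, ?_⟩
  have h2 := hp.2
  rw [pvGstep] at h2
  split at h2
  · exact h2
  · refine pvPrefix_scan_rev ['.', ' ', '[', e, ']'] ?_ Y h2
    intro ch hch
    fin_cases hch
    · fin_cases hd <;> decide
    · fin_cases hd <;> decide
    · fin_cases hd <;> decide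
    · exact hne.symm
    · fin_cases hd <;> decide

theorem pvChain_block {D : List Char} {d : Char} (hd : d ∈ pvDigits) (u : List Char) :
    pvChain D (pvPat d ++ u) =
      (if PySem.Chars.isIn (pvRef d) D then pvPat d else pvRep d) ++ pvChain D u := by
  unfold pvChain
  by_cases hC : PySem.Chars.isIn (pvRef d) D = true
  case pos =>
    fin_cases hd <;>
      simp only [pvGstep_hit, hC, if_true,
        pvGstep_skip (by decide : ('0' : Char) ∈ pvDigits) (by decide : ('1' : Char) ∈ pvDigits) (by decide),
        pvGstep_skip (by decide : ('0' : Char) ∈ pvDigits) (by decide : ('2' : Char) ∈ pvDigits) (by decide),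
        pvGstep_skip (by decide : ('0' : Char) ∈ pvDigits) (by decide : ('3' : Char) ∈ pvDigits) (by decide),
        pvGstep_skip (by decide : ('0' : Char) ∈ pvDigits) (by decide : ('4' : Char) ∈ pvDigits) (by decide),
        pvGstep_skip (by decide : ('1' : Char) ∈ pvDigits) (by decide : ('0' : Char) ∈ pvDigits) (by decide),
        pvGstep_skip (by decide : ('1' : Char) ∈ pvDigits) (by decide : ('2' : Char) ∈ pvDigits) (by decide),
        pvGstep_skip (by decide : ('1' : Char) ∈ pvDigits) (by decide : ('3' : Char) ∈ pvDigits) (by decide),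
        pvGstep_skip (by decide : ('1' : Char) ∈ pvDigits) (by decide : ('4' : Char) ∈ pvDigits) (by decide),
        pvGstep_skip (by decide : ('2' : Char) ∈ pvDigits) (by decide : ('0' : Char) ∈ pvDigits) (by decide),
        pvGstep_skip (by decide : ('2' : Char) ∈ pvDigits) (by decide : ('1' : Char) ∈ pvDigits) (by decide),
        pvGstep_skip (by decide : ('2' : Char) ∈ pvDigits) (by decide : ('3' : Char) ∈ pvDigits) (by decide),
        pvGstep_skip (by decide : ('2' : Char) ∈ pvDigits) (by decide : ('4' : Char) ∈ pvDigits) (by decide),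
        pvGstep_skip (by decide : ('3' : Char) ∈ pvDigits) (by decide : ('0' : Char) ∈ pvDigits) (by decide),
        pvGstep_skip (by decide : ('3' : Char) ∈ pvDigits) (by decide : ('1' : Char) ∈ pvDigits) (by decide),
        pvGstep_skip (by decide : ('3' : Char) ∈ pvDigits) (by decide : ('2' : Char) ∈ pvDigits) (by decide),
        pvGstep_skip (by decide : ('3' : Char) ∈ pvDigits) (by decide : ('4' : Char) ∈ pvDigits) (by decide),
        pvGstep_skip (by decide : ('4' : Char) ∈ pvDigits) (by decide : ('0' : Char) ∈ pvDigits) (by decide),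
        pvGstep_skip (by decide : ('4' : Char) ∈ pvDigits) (by decide : ('1' : Char) ∈ pvDigits) (by decide),
        pvGstep_skip (by decide : ('4' : Char) ∈ pvDigits) (by decide : ('2' : Char) ∈ pvDigits) (by decide),
        pvGstep_skip (by decide : ('4' : Char) ∈ pvDigits) (by decide : ('3' : Char) ∈ pvDigits) (by decide)]
  case neg =>
    rw [Bool.not_eq_true] at hC
    fin_cases hd <;>
      simp only [pvGstep_hit, hC, Bool.false_eq_true, if_false,
        pvGstep_skip (by decide : ('0' : Char) ∈ pvDigits) (by decide : ('1' : Char) ∈ pvDigits) (by decide),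
        pvGstep_skip (by decide : ('0' : Char) ∈ pvDigits) (by decide : ('2' : Char) ∈ pvDigits) (by decide),
        pvGstep_skip (by decide : ('0' : Char) ∈ pvDigits) (by decide : ('3' : Char) ∈ pvDigits) (by decide),
        pvGstep_skip (by decide : ('0' : Char) ∈ pvDigits) (by decide : ('4' : Char) ∈ pvDigits) (by decide),
        pvGstep_skip (by decide : ('1' : Char) ∈ pvDigits) (by decide : ('0' : Char) ∈ pvDigits) (by decide),
        pvGstep_skip (by decide : ('1' : Char) ∈ pvDigits) (by decide : ('2' : Char) ∈ pvDigits) (by decide),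
        pvGstep_skip (by decide : ('1' : Char) ∈ pvDigits) (by decide : ('3' : Char) ∈ pvDigits) (by decide),
        pvGstep_skip (by decide : ('1' : Char) ∈ pvDigits) (by decide : ('4' : Char) ∈ pvDigits) (by decide),
        pvGstep_skip (by decide : ('2' : Char) ∈ pvDigits) (by decide : ('0' : Char) ∈ pvDigits) (by decide),
        pvGstep_skip (by decide : ('2' : Char) ∈ pvDigits) (by decide : ('1' : Char) ∈ pvDigits) (by decide),
        pvGstep_skip (by decide : ('2' : Char) ∈ pvDigits) (by decide : ('3' : Char) ∈ pvDigits) (by decide),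
        pvGstep_skip (by decide : ('2' : Char) ∈ pvDigits) (by decide : ('4' : Char) ∈ pvDigits) (by decide),
        pvGstep_skip (by decide : ('3' : Char) ∈ pvDigits) (by decide : ('0' : Char) ∈ pvDigits) (by decide),
        pvGstep_skip (by decide : ('3' : Char) ∈ pvDigits) (by decide : ('1' : Char) ∈ pvDigits) (by decide),
        pvGstep_skip (by decide : ('3' : Char) ∈ pvDigits) (by decide : ('2' : Char) ∈ pvDigits) (by decide),
        pvGstep_skip (by decide : ('3' : Char) ∈ pvDigits) (by decide : ('4' : Char) ∈ pvDigits) (by decide),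
        pvGstep_skip (by decide : ('4' : Char) ∈ pvDigits) (by decide : ('0' : Char) ∈ pvDigits) (by decide),
        pvGstep_skip (by decide : ('4' : Char) ∈ pvDigits) (by decide : ('1' : Char) ∈ pvDigits) (by decide),
        pvGstep_skip (by decide : ('4' : Char) ∈ pvDigits) (by decide : ('2' : Char) ∈ pvDigits) (by decide),
        pvGstep_skip (by decide : ('4' : Char) ∈ pvDigits) (by decide : ('3' : Char) ∈ pvDigits) (by decide),
        pvGstep_skip_rep (by decide : ('0' : Char) ∈ pvDigits),
        pvGstep_skip_rep (by decide : ('1' : Char) ∈ pvDigits),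
        pvGstep_skip_rep (by decide : ('2' : Char) ∈ pvDigits),
        pvGstep_skip_rep (by decide : ('3' : Char) ∈ pvDigits),
        pvGstep_skip_rep (by decide : ('4' : Char) ∈ pvDigits)]

theorem pvChain_cons {D : List Char} {c : Char} {t : List Char}
    (h : ∀ d ∈ pvDigits, ¬ (pvPat d).isPrefixOf (c :: t)) :
    pvChain D (c :: t) = c :: pvChain D t := by
  have p1 : ¬ (pvPat '1').isPrefixOf (c :: pvGstep D '0' t) :=
    pvNotPrefix_gstep (by decide) (by decide) (h '1' (by decide))
  have p2 : ¬ (pvPat '2').isPrefixOf (c :: pvGstep D '1' (pvGstep D '0' t)) :=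
    pvNotPrefix_gstep (by decide) (by decide)
      (pvNotPrefix_gstep (by decide) (by decide) (h '2' (by decide)))
  have p3 : ¬ (pvPat '3').isPrefixOf (c :: pvGstep D '2' (pvGstep D '1' (pvGstep D '0' t))) :=
    pvNotPrefix_gstep (by decide) (by decide)
      (pvNotPrefix_gstep (by decide) (by decide)
        (pvNotPrefix_gstep (by decide) (by decide) (h '3' (by decide))))
  have p4 : ¬ (pvPat '4').isPrefixOf
      (c :: pvGstep D '3' (pvGstep D '2' (pvGstep D '1' (pvGstep D '0' t)))) :=
    pvNotPrefix_gstep (by decide) (by decide)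
      (pvNotPrefix_gstep (by decide) (by decide)
        (pvNotPrefix_gstep (by decide) (by decide)
          (pvNotPrefix_gstep (by decide) (by decide) (h '4' (by decide)))))
  unfold pvChain
  rw [pvGstep_cons (h '0' (by decide)), pvGstep_cons p1, pvGstep_cons p2, pvGstep_cons p3,
    pvGstep_cons p4]

theorem pvMatch_some {s : List Char} {d : Char} (h : pvMatch s = some d) :
    d ∈ pvDigits ∧ s = pvPat d ++ s.drop 6 := by
  unfold pvMatch at h
  split at h
  · next a b rest =>
      split at h
      · next hmem =>
          injection h with h; subst h
          exact ⟨hmem, by simp [pvPat]⟩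
      · exact absurd h (by simp)
  · exact absurd h (by simp)

theorem pvMatch_none {s : List Char} (h : pvMatch s = none) :
    ∀ d ∈ pvDigits, ¬ (pvPat d).isPrefixOf s := by
  intro d hd hp
  obtain ⟨r, hr⟩ := List.isPrefixOf_iff_prefix.mp hp
  rw [← hr] at h
  rw [show pvPat d ++ r = '.' :: '.' :: ' ' :: '[' :: d :: ']' :: r from rfl] at h
  have hd' : d ∈ (['0', '1', '2', '3', '4'] : List Char) := hd
  rw [pvMatch, if_pos hd'] at h
  exact absurd h (by simp)

theorem pvChain_eq_altGo (D : List Char) :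
    ∀ n (s : List Char), s.length ≤ n → pvChain D s = pvAltGo D s := by
  intro n
  induction n with
  | zero =>
      intro s hs
      have : s = [] := List.length_eq_zero_iff.mp (Nat.le_zero.mp hs)
      subst this
      simp [pvChain, pvGstep, pvScan, pvAltGo]
  | succ n ih =>
      intro s hs
      cases s with
      | nil => simp [pvChain, pvGstep, pvScan, pvAltGo]
      | cons c t =>
          cases hm : pvMatch (c :: t) with
          | some d =>
              obtain ⟨hd, hshape⟩ := pvMatch_some hm
              have ht : (c :: t).drop 6 = t.drop 5 := by simp
              have hlen : (t.drop 5).length ≤ n := by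
                simp [List.length_drop] at *; omega
              rw [pvAltGo, hm]
              rw [hshape, ht, pvChain_block hd, ih _ hlen]
          | none =>
              rw [pvAltGo, hm, pvChain_cons (pvMatch_none hm), ih t (by simp at hs; omega)]

-- one String-level step of A's loop body computes pvHstep on the character list
theorem pvAstep_toList (d : Char) (s : String) :
    (if !(PySem.Str.isIn (String.ofList (pvPat d)) s) ||
        PySem.Str.isIn (String.ofList (pvRef d)) s then s
     else PySem.Str.replace s (String.ofList (pvPat d)) (String.ofList (pvRep d))).toList
      = pvHstep d s.toList := by
  rw [pvHstep]
  cases href : PySem.Chars.isIn (pvRef d) s.toList with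
  | true =>
      rw [if_pos (by simp [PySem.Str.isIn, href]), if_pos rfl]
  | false =>
      cases hpat : PySem.Chars.isIn (pvPat d) s.toList with
      | true =>
          rw [if_neg (by simp [PySem.Str.isIn, href, hpat]), if_neg (by simp),
            PySem.Str.toList_replace]
          simp only [String.toList_ofList]
          exact pvReplace_eq_scan s.toList _ _ (by simp [pvPat])
      | false =>
          rw [if_pos (by simp [PySem.Str.isIn, href, hpat]), if_neg (by simp)]
          exact (pvScan_eq_self _ _ s.toList
            ((PySem.Chars.isIn_eq_false_iff _ _).mp hpat)).symm

-- the conditions A reads off intermediate strings equal those read off the original doc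
theorem pvHstep_eq_gstep {D : List Char} {e : Char} {X : List Char}
    (h : PySem.Chars.isIn (pvRef e) X = PySem.Chars.isIn (pvRef e) D) :
    pvHstep e X = pvGstep D e X := by
  rw [pvHstep, pvGstep, h]

theorem pvToList_A (doc : String) :
    (remove_unused_reference_labels_py doc).toList = pvChain doc.toList doc.toList := by
  rw [remove_unused_reference_labels_py,
    show PySem.List.pyRange 0 5 1 = [0, 1, 2, 3, 4] from by decide]
  simp only [List.foldl_cons, List.foldl_nil]
  rw [show String.ofList (".. [".toList ++ (PySem.Int.toStr 0).toList ++ "]".toList)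
      = String.ofList (pvPat '0') from by decide,
    show String.ofList (".. [".toList ++ (PySem.Int.toStr 1).toList ++ "]".toList)
      = String.ofList (pvPat '1') from by decide,
    show String.ofList (".. [".toList ++ (PySem.Int.toStr 2).toList ++ "]".toList)
      = String.ofList (pvPat '2') from by decide,
    show String.ofList (".. [".toList ++ (PySem.Int.toStr 3).toList ++ "]".toList)
      = String.ofList (pvPat '3') from by decide,
    show String.ofList (".. [".toList ++ (PySem.Int.toStr 4).toList ++ "]".toList)
      = String.ofList (pvPat '4') from by decide,
    show String.ofList ("[".toList ++ (PySem.Int.toStr 0).toList ++ "]_".toList)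
      = String.ofList (pvRef '0') from by decide,
    show String.ofList ("[".toList ++ (PySem.Int.toStr 1).toList ++ "]_".toList)
      = String.ofList (pvRef '1') from by decide,
    show String.ofList ("[".toList ++ (PySem.Int.toStr 2).toList ++ "]_".toList)
      = String.ofList (pvRef '2') from by decide,
    show String.ofList ("[".toList ++ (PySem.Int.toStr 3).toList ++ "]_".toList)
      = String.ofList (pvRef '3') from by decide,
    show String.ofList ("[".toList ++ (PySem.Int.toStr 4).toList ++ "]_".toList)
      = String.ofList (pvRef '4') from by decide,
    show String.ofList ((PySem.Int.toStr 0).toList ++ ".    ".toList)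
      = String.ofList (pvRep '0') from by decide,
    show String.ofList ((PySem.Int.toStr 1).toList ++ ".    ".toList)
      = String.ofList (pvRep '1') from by decide,
    show String.ofList ((PySem.Int.toStr 2).toList ++ ".    ".toList)
      = String.ofList (pvRep '2') from by decide,
    show String.ofList ((PySem.Int.toStr 3).toList ++ ".    ".toList)
      = String.ofList (pvRep '3') from by decide,
    show String.ofList ((PySem.Int.toStr 4).toList ++ ".    ".toList)
      = String.ofList (pvRep '4') from by decide]
  rw [pvAstep_toList '4', pvAstep_toList '3', pvAstep_toList '2', pvAstep_toList '1',
    pvAstep_toList '0']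
  have c1 : PySem.Chars.isIn (pvRef '1') (pvHstep '0' doc.toList)
      = PySem.Chars.isIn (pvRef '1') doc.toList :=
    pvCond_inv (by decide) (by decide) (by decide) _
  have c2 : PySem.Chars.isIn (pvRef '2') (pvHstep '1' (pvHstep '0' doc.toList))
      = PySem.Chars.isIn (pvRef '2') doc.toList :=
    (pvCond_inv (by decide) (by decide) (by decide) _).trans
      (pvCond_inv (by decide) (by decide) (by decide) _)
  have c3 : PySem.Chars.isIn (pvRef '3') (pvHstep '2' (pvHstep '1' (pvHstep '0' doc.toList)))
      = PySem.Chars.isIn (pvRef '3') doc.toList :=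
    ((pvCond_inv (by decide) (by decide) (by decide) _).trans
      (pvCond_inv (by decide) (by decide) (by decide) _)).trans
        (pvCond_inv (by decide) (by decide) (by decide) _)
  have c4 : PySem.Chars.isIn (pvRef '4')
        (pvHstep '3' (pvHstep '2' (pvHstep '1' (pvHstep '0' doc.toList))))
      = PySem.Chars.isIn (pvRef '4') doc.toList :=
    (((pvCond_inv (by decide) (by decide) (by decide) _).trans
      (pvCond_inv (by decide) (by decide) (by decide) _)).trans
        (pvCond_inv (by decide) (by decide) (by decide) _)).trans
          (pvCond_inv (by decide) (by decide) (by decide) _)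
  rw [pvChain, pvHstep_eq_gstep c4, pvHstep_eq_gstep c3, pvHstep_eq_gstep c2,
    pvHstep_eq_gstep c1, pvHstep_eq_gstep rfl]

-- ===== VERDICT (by name: the statement is the Claim_ definition above) =====
theorem remove_unused_reference_labels_py_spec : Claim_equal_remove_unused_reference_labels_py := by
  intro doc _
  unfold Spec_remove_unused_reference_labels_py
  apply String.toList_inj.mp
  rw [pvToList_A, pvChain_eq_altGo doc.toList doc.toList.length doc.toList le_rfl,
    remove_unused_reference_labels_py_alt, String.toList_ofList]
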